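-- pv_equiv track=rewrite | github.com/duochen/Python-Beginner | LearnToCodeBySolvingProblems/ch9/angry_cows.py | explode_left
-- ===== SOURCE A (Python) =====
-- def explode_left_one(hay_bales, explode_index, radius):
--     """
--     hay_bales is a sorted list of hay bale positions.
--     explode_index is the index of the hay bale that is exploded.
--     radius is the radius of the explosion.
--
--     Return the index of the leftmost hay bale within the radius that explodes.
--     """
--     if explode_index == 0:
--         return explode_index
--     i = explode_index - 1
--     while i >= 0 and hay_bales[explode_index] - hay_bales[i] <= radius:
--         i = i - 1
--     return i + 1
--
-- def explode_left(hay_bales, explode_index):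
--     """
--     hay_bales is a sorted list of hay bale positions.
--     explode_index is the index of the hay bale that is exploded.
--
--     Return the index of the leftmost hay bale that explodes.
--     """
--     radius = 1
--     done = False
--     while not done:
--         leftmost = explode_left_one(hay_bales, explode_index, radius)
--         if leftmost == explode_index:
--             done = True
--         else:
--             explode_index = leftmost
--             radius = radius + 1
--     return leftmost
-- ===== SOURCE B (Python) =====
-- def explode_left(hay_bales, explode_index):
--     """
--     hay_bales is a sorted list of hay bale positions.
--     explode_index is the index of the hay bale that is exploded.
--
--     Return the index of the leftmost hay bale that explodes.
--     Same waves as the original, but each wave finds the leftmost reachable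
--     bale by binary search over the prefix instead of a linear leftward scan.
--     """
--     radius = 1
--     while explode_index > 0:
--         target = hay_bales[explode_index] - radius
--         lo, hi = 0, explode_index
--         while lo < hi:
--             mid = (lo + hi) // 2
--             if hay_bales[mid] < target:
--                 lo = mid + 1
--             else:
--                 hi = mid
--         if lo == explode_index:
--             break
--         explode_index = lo
--         radius = radius + 1
--     return explode_index
-- ===== Notes on version B (the rewrite author's own statement) =====
-- stated objective: alternative
-- what changed: Each explosion wave finds the leftmost reachable bale by a hand-written binary search over the prefix of the sorted list instead of A's linear leftward scan; waves and radius growth are kept.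
-- outside the precondition, e.g. on explode_left([0, 9, 0, 5], 3): A returns 3, B returns 1
import Mathlib
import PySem

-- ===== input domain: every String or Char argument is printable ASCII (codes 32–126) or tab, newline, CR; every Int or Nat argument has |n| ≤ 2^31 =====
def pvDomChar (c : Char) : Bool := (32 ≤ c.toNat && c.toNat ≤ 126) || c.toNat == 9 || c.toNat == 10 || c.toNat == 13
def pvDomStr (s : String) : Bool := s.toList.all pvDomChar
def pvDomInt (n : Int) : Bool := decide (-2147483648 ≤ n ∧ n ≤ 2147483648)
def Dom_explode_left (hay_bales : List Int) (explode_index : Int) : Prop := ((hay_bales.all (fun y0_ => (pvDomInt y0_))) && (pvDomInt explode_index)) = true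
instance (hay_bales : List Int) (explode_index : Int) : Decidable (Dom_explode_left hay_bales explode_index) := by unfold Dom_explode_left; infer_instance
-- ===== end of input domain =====

-- B keeps A's explosion waves but replaces the linear leftward scan of each wave by a binary search over the sorted prefix (alternative algorithm).


-- ===== PORT A =====
-- the inner while loop of explode_left_one: i counts down while the bale at i is within the radius
-- (structural recursion on a fuel that the callers instantiate provably large enough — a totality
-- guard only, never reached by the loop itself)
def pvScanA (hb : List Int) (ei r : Int) : Nat → Int → Int
  | 0, i => i + 1
  | fuel + 1, i =>
    if 0 ≤ i ∧ PySem.List.pyGetD hb ei 0 - PySem.List.pyGetD hb i 0 ≤ r then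
      pvScanA hb ei r fuel (i - 1)
    else
      i + 1

def pvExplodeLeftOne (hb : List Int) (ei r : Int) : Int :=
  if ei = 0 then ei else pvScanA hb ei r (ei.toNat + 1) (ei - 1)

-- the outer while loop of A's explode_left (fuel: the index strictly decreases each kept wave)
def pvLoopA (hb : List Int) : Nat → Int → Int → Int
  | 0, ei, _ => ei
  | fuel + 1, ei, r =>
    if pvExplodeLeftOne hb ei r = ei then pvExplodeLeftOne hb ei r
    else pvLoopA hb fuel (pvExplodeLeftOne hb ei r) (r + 1)

def explode_left (hay_bales : List Int) (explode_index : Int) : Int :=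
  pvLoopA hay_bales (explode_index.toNat + 1) explode_index 1

-- ===== PORT B =====
-- the inner while loop of Source B: hand-written binary search for the leftmost index with hb[k] >= t
-- (fuel: the interval at least halves each step)
def pvBsearch (hb : List Int) (t : Int) : Nat → Int → Int → Int
  | 0, lo, _ => lo
  | fuel + 1, lo, hi =>
    if lo < hi then
      if PySem.List.pyGetD hb (PySem.Int.floordiv (lo + hi) 2) 0 < t then
        pvBsearch hb t fuel (PySem.Int.floordiv (lo + hi) 2 + 1) hi
      else
        pvBsearch hb t fuel lo (PySem.Int.floordiv (lo + hi) 2)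
    else lo

-- the outer while loop of Source B
def pvLoopB (hb : List Int) : Nat → Int → Int → Int
  | 0, ei, _ => ei
  | fuel + 1, ei, r =>
    if 0 < ei then
      if pvBsearch hb (PySem.List.pyGetD hb ei 0 - r) (ei.toNat + 1) 0 ei = ei then ei
      else pvLoopB hb fuel (pvBsearch hb (PySem.List.pyGetD hb ei 0 - r) (ei.toNat + 1) 0 ei) (r + 1)
    else ei

def explode_left_alt (hay_bales : List Int) (explode_index : Int) : Int :=
  pvLoopB hay_bales (explode_index.toNat + 1) explode_index 1

-- ===== PRECONDITION & SPEC =====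
-- Pre_ is the documented domain: when a positive index is exploded the list must be sorted with the
-- index in range — A raises IndexError once 1 ≤ explode_index and explode_index ≥ len(hay_bales),
-- and on unsorted lists A's leftward-scan result is an accident of the scan order that B's binary
-- search (which relies on the documented sortedness) need not match; all other inputs are admitted.
def Pre_explode_left (hay_bales : List Int) (explode_index : Int) : Prop :=
  0 < explode_index → (explode_index < (hay_bales.length : Int) ∧ List.Pairwise (· ≤ ·) hay_bales)
instance (hay_bales : List Int) (explode_index : Int) : Decidable (Pre_explode_left hay_bales explode_index) := by unfold Pre_explode_left; infer_instance

def pvWitness_explode_left : List Int × Int := ([1, 2, 5, 6, 7], 3)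

def Spec_explode_left (hay_bales : List Int) (explode_index : Int) (out : Int) : Prop := out = explode_left_alt hay_bales explode_index
instance (hay_bales : List Int) (explode_index : Int) (out : Int) : Decidable (Spec_explode_left hay_bales explode_index out) := by unfold Spec_explode_left; infer_instance

-- ===== CLAIM (what is proved, stated in full; the proofs are below) =====
def Claim_equal_explode_left : Prop := ∀ (hay_bales : List Int) (explode_index : Int), Dom_explode_left hay_bales explode_index → Pre_explode_left hay_bales explode_index → Spec_explode_left hay_bales explode_index (explode_left hay_bales explode_index)

-- ===== LEMMAS AND PROOFS =====

-- characterisation of A's inner scan under adequate fuel: the result bounds, everything from the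
-- result up to the start is within the radius, and the element just left of a positive result is not
theorem pvScanA_spec (hb : List Int) (ei r : Int) : ∀ (fuel : Nat) (i : Int),
    (i + 1).toNat < fuel →
    pvScanA hb ei r fuel i ≤ i + 1 ∧
    (-1 ≤ i → 0 ≤ pvScanA hb ei r fuel i) ∧
    (0 < pvScanA hb ei r fuel i →
      r < PySem.List.pyGetD hb ei 0 - PySem.List.pyGetD hb (pvScanA hb ei r fuel i - 1) 0) ∧
    (∀ k, pvScanA hb ei r fuel i ≤ k → k ≤ i →
      PySem.List.pyGetD hb ei 0 - PySem.List.pyGetD hb k 0 ≤ r) := by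
  intro fuel
  induction fuel with
  | zero => intro i hf; omega
  | succ fuel ih =>
    intro i hf
    rw [pvScanA]
    split_ifs with h
    · have ih' := ih (i - 1) (by omega)
      refine ⟨by omega, fun _ => by omega, ih'.2.2.1, fun k hk1 hk2 => ?_⟩
      rcases lt_or_eq_of_le hk2 with hlt | heq
      · exact ih'.2.2.2 k hk1 (by omega)
      · subst heq; exact h.2
    · push Not at h
      refine ⟨le_refl _, by omega, fun hpos => ?_, fun k hk1 hk2 => by omega⟩
      have h' := h (by omega)
      have hi : i + 1 - 1 = i := by ring
      rw [hi]
      exact h'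

-- the binary-search result stays inside [lo, hi] (under adequate fuel)
theorem pvBsearch_bounds (hb : List Int) (t : Int) : ∀ (fuel : Nat) (lo hi : Int),
    (hi - lo).toNat < fuel → lo ≤ hi →
    lo ≤ pvBsearch hb t fuel lo hi ∧ pvBsearch hb t fuel lo hi ≤ hi := by
  intro fuel
  induction fuel with
  | zero => intro lo hi hf _; omega
  | succ fuel ih =>
    intro lo hi hf hlh
    rw [pvBsearch]
    split_ifs with h hc
    · have h1 := PySem.Int.floordiv_two_mid_bounds (le_of_lt h)
      have h2 := PySem.Int.floordiv_lt_iff_lt_mul (a := lo + hi) (b := 2) (q := hi) (by omega)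
      have := ih (PySem.Int.floordiv (lo + hi) 2 + 1) hi (by omega) (by omega)
      omega
    · have h1 := PySem.Int.floordiv_two_mid_bounds (le_of_lt h)
      have h2 := PySem.Int.floordiv_lt_iff_lt_mul (a := lo + hi) (b := 2) (q := hi) (by omega)
      have := ih lo (PySem.Int.floordiv (lo + hi) 2) (by omega) (by omega)
      omega
    · omega

-- characterisation of B's binary search: the element left of the result is below the target,
-- the element at the result (if inside) is not
theorem pvBsearch_spec (hb : List Int) (t : Int) : ∀ (fuel : Nat) (lo hi : Int),
    (hi - lo).toNat < fuel → lo ≤ hi →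
    (lo < pvBsearch hb t fuel lo hi → PySem.List.pyGetD hb (pvBsearch hb t fuel lo hi - 1) 0 < t) ∧
    (pvBsearch hb t fuel lo hi < hi → t ≤ PySem.List.pyGetD hb (pvBsearch hb t fuel lo hi) 0) := by
  intro fuel
  induction fuel with
  | zero => intro lo hi hf _; omega
  | succ fuel ih =>
    intro lo hi hf hlh
    rw [pvBsearch]
    split_ifs with h hc
    · have hm := PySem.Int.floordiv_two_mid_bounds (le_of_lt h)
      have hm2 := PySem.Int.floordiv_lt_iff_lt_mul (a := lo + hi) (b := 2) (q := hi) (by omega)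
      have hbb := pvBsearch_bounds hb t fuel (PySem.Int.floordiv (lo + hi) 2 + 1) hi (by omega) (by omega)
      have ih' := ih (PySem.Int.floordiv (lo + hi) 2 + 1) hi (by omega) (by omega)
      refine ⟨fun h1 => ?_, ih'.2⟩
      rcases lt_or_eq_of_le hbb.1 with hlt | heq
      · exact ih'.1 hlt
      · rw [← heq]
        simpa using hc
    · have hm := PySem.Int.floordiv_two_mid_bounds (le_of_lt h)
      have hm2 := PySem.Int.floordiv_lt_iff_lt_mul (a := lo + hi) (b := 2) (q := hi) (by omega)
      have hbb := pvBsearch_bounds hb t fuel lo (PySem.Int.floordiv (lo + hi) 2) (by omega) (by omega)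
      have ih' := ih lo (PySem.Int.floordiv (lo + hi) 2) (by omega) (by omega)
      refine ⟨ih'.1, fun h2 => ?_⟩
      rcases lt_or_eq_of_le hbb.2 with hlt | heq
      · exact ih'.2 hlt
      · rw [heq]
        omega
    · constructor <;> omega

-- pyGetD is monotone on a sorted list
theorem pyGetD_mono (hb : List Int) (hs : List.Pairwise (· ≤ ·) hb) (a b : Int)
    (ha : 0 ≤ a) (hab : a ≤ b) (hblen : b < (hb.length : Int)) :
    PySem.List.pyGetD hb a 0 ≤ PySem.List.pyGetD hb b 0 := by
  rw [PySem.List.pyGetD_eq_getElem hb 0 ha (by omega), PySem.List.pyGetD_eq_getElem hb 0 (by omega) hblen]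
  rcases lt_or_eq_of_le hab with hlt | heq
  · exact (List.pairwise_iff_getElem.mp hs) a.toNat b.toNat (by omega) (by omega) (by omega)
  · subst heq; exact le_refl _

-- one wave: on a sorted list the scan and the binary search return the same index
theorem wave_eq (hb : List Int) (ei r : Int) (hpos : 0 < ei) (hlen : ei < (hb.length : Int))
    (hs : List.Pairwise (· ≤ ·) hb) :
    pvScanA hb ei r (ei.toNat + 1) (ei - 1) =
      pvBsearch hb (PySem.List.pyGetD hb ei 0 - r) (ei.toNat + 1) 0 ei := by
  have hSs := pvScanA_spec hb ei r (ei.toNat + 1) (ei - 1) (by omega)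
  have hBb := pvBsearch_bounds hb (PySem.List.pyGetD hb ei 0 - r) (ei.toNat + 1) 0 ei (by omega) (by omega)
  have hBs := pvBsearch_spec hb (PySem.List.pyGetD hb ei 0 - r) (ei.toNat + 1) 0 ei (by omega) (by omega)
  set s := pvScanA hb ei r (ei.toNat + 1) (ei - 1) with hsdef
  set m := pvBsearch hb (PySem.List.pyGetD hb ei 0 - r) (ei.toNat + 1) 0 ei with hmdef
  have hs0 : 0 ≤ s := hSs.2.1 (by omega)
  have hs1 : s ≤ ei := by have := hSs.1; omega
  rcases lt_trichotomy s m with hlt | heq | hgt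
  · -- s < m : the element at m-1 is below the target, yet the scan covered m-1
    have h1 := hBs.1 (by omega)
    have h2 := hSs.2.2.2 (m - 1) (by omega) (by omega)
    omega
  · exact heq
  · -- m < s : target ≤ hb[m] ≤ hb[s-1] < target by sortedness
    have h1 := hBs.2 (by omega)
    have h2 := hSs.2.2.1 (by omega)
    have h3 := pyGetD_mono hb hs m (s - 1) (by omega) (by omega) (by omega)
    omega

-- when the index is not positive, A's wave returns it unchanged
theorem pvExplodeLeftOne_id (hb : List Int) (ei r : Int) (hei : ei ≤ 0) :
    pvExplodeLeftOne hb ei r = ei := by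
  rcases lt_or_eq_of_le hei with hlt | heq
  · rw [pvExplodeLeftOne, if_neg (by omega)]
    have : ei.toNat + 1 = 0 + 1 := by omega
    rw [this, pvScanA, if_neg (by omega)]
    omega
  · rw [pvExplodeLeftOne, if_pos heq]

-- the two outer loops agree under the precondition (induction on the shared fuel)
theorem loop_eq (hb : List Int) : ∀ (fuel : Nat) (ei r : Int), ei.toNat < fuel →
    (0 < ei → (ei < (hb.length : Int) ∧ List.Pairwise (· ≤ ·) hb)) →
    pvLoopA hb fuel ei r = pvLoopB hb fuel ei r := by
  intro fuel
  induction fuel with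
  | zero => intro ei r hf _; omega
  | succ fuel ih =>
    intro ei r hf hpre
    by_cases hpos : 0 < ei
    · obtain ⟨hlen, hs⟩ := hpre hpos
      have hA : pvExplodeLeftOne hb ei r =
          pvBsearch hb (PySem.List.pyGetD hb ei 0 - r) (ei.toNat + 1) 0 ei := by
        rw [pvExplodeLeftOne, if_neg (by omega)]
        exact wave_eq hb ei r hpos hlen hs
      have hBb := pvBsearch_bounds hb (PySem.List.pyGetD hb ei 0 - r) (ei.toNat + 1) 0 ei (by omega) (by omega)
      by_cases hdone : pvBsearch hb (PySem.List.pyGetD hb ei 0 - r) (ei.toNat + 1) 0 ei = ei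
      · have hA' : pvExplodeLeftOne hb ei r = ei := hA.trans hdone
        rw [pvLoopA, if_pos hA', hA', pvLoopB, if_pos hpos, if_pos hdone]
      · rw [pvLoopA, if_neg (by rw [hA]; exact hdone), pvLoopB, if_pos hpos, if_neg hdone, hA]
        exact ih _ _ (by omega) (fun _ => ⟨by omega, hs⟩)
    · have hA : pvExplodeLeftOne hb ei r = ei := pvExplodeLeftOne_id hb ei r (by omega)
      rw [pvLoopA, if_pos hA, hA, pvLoopB, if_neg hpos]

-- ===== VERDICT (by name: the statement is the Claim_ definition above) =====
theorem explode_left_spec : Claim_equal_explode_left := by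
  intro hb ei _ hpre
  unfold Spec_explode_left explode_left explode_left_alt
  exact loop_eq hb (ei.toNat + 1) ei 1 (by omega) hpre
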